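-- pv_equiv track=rewrite | github.com/MannLabs/alphapept | alphapept/fasta.py | add_variable_mod
-- ===== SOURCE A (Python) =====
-- def add_variable_mod(peps:list, mods_variable_dict:dict)->list:
--     """
--     Function to add variable modification to a list of peptides.
--     Args:
--         peps (list): List of peptides.
--         mods_variable_dict (dict): Dicitionary with modifications. The key is AA, and value is the modified form (e.g. oxM).
--     Returns:
--         list : the list of peptide forms for the given peptide.
--     """
--     peptides = []
--     for pep_ in peps:
--         pep, min_idx = pep_
--         for mod in mods_variable_dict:
--             for i in range(len(pep)):
--                 if i >= min_idx:
--                     c = pep[i]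
--                     if c == mod:
--                         peptides.append((pep[:i]+[mods_variable_dict[c]]+pep[i+1:], i))
--     return peptides
-- ===== SOURCE B (Python) =====
-- def add_variable_mod(peps: list, mods_variable_dict: dict) -> list:
--     """Two staged passes: index each peptide once (amino acid -> ascending
--     modifiable positions), then emit all modified forms from those indexes in
--     one comprehension, rebuilding each form elementwise instead of slicing."""
--     mods = list(mods_variable_dict.items())
--
--     def index_positions(pep, min_idx):
--         positions = {}
--         for i, c in enumerate(pep):
--             if i >= min_idx:
--                 positions.setdefault(c, []).append(i)
--         return positions
--
--     indexed = [(pep, index_positions(pep, min_idx)) for pep, min_idx in peps]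
--     return [
--         ([repl if j == i else x for j, x in enumerate(pep)], i)
--         for pep, positions in indexed
--         for aa, repl in mods
--         for i in positions.get(aa, [])
--     ]
-- ===== Notes on version B (the rewrite author's own statement) =====
-- stated objective: faster
-- what changed: B runs two staged passes -- first indexing each peptide once into a dict from amino acid to its ascending modifiable positions, then emitting all modified forms from those indexes in a single comprehension that rebuilds each form elementwise -- instead of A's accumulator loop that rescans the whole peptide once per modification and splices with slices.
import Mathlib
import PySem

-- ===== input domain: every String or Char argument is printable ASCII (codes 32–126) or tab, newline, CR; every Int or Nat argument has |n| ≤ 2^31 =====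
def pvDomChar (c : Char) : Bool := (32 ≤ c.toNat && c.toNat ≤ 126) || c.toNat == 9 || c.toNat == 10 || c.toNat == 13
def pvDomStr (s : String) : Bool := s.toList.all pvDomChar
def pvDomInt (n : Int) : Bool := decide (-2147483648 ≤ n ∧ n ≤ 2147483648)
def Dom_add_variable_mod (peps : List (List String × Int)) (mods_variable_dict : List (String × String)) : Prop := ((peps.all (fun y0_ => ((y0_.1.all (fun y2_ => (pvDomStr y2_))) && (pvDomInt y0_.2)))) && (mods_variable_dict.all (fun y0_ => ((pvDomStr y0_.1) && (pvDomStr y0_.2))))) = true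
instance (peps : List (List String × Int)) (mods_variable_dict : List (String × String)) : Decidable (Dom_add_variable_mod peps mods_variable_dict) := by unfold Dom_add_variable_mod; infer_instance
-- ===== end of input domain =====

-- B indexes each peptide once (amino acid -> ascending modifiable positions) in a first pass and
-- then emits all modified forms in one comprehension, rebuilding each form elementwise.

-- ===== PORT A =====
def add_variable_mod (peps : List (List String × Int)) (mods_variable_dict : List (String × String)) : List (List String × Int) :=
  peps.foldl (fun peptides pep_ =>
    (PySem.Dict.keys (PySem.Dict.ofList mods_variable_dict)).foldl (fun acc mod =>
      (PySem.List.pyRange 0 (PySem.List.len pep_.1) 1).foldl (fun acc2 i =>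
        if pep_.2 ≤ i then
          if PySem.List.pyGetD pep_.1 i "" == mod then
            acc2 ++ [(PySem.List.slice pep_.1 none (some i) ++
              [PySem.Dict.getD (PySem.Dict.ofList mods_variable_dict) (PySem.List.pyGetD pep_.1 i "") ""] ++
              PySem.List.slice pep_.1 (some (i+1)) none, i)]
          else acc2
        else acc2) acc) peptides) []

-- ===== PORT B =====
-- helper index_positions of Source B: one pass over enumerate(pep), AA -> ascending modifiable positions
def pvIndexPositions (pep : List String) (min_idx : Int) : PySem.Dict String (List Int) :=
  (PySem.List.enumerate pep 0).foldl (fun d p =>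
    if min_idx ≤ p.1 then PySem.Dict.modify d p.2 [] (· ++ [p.1]) else d) PySem.Dict.empty

def add_variable_mod_alt (peps : List (List String × Int)) (mods_variable_dict : List (String × String)) : List (List String × Int) :=
  let mods := PySem.Dict.items (PySem.Dict.ofList mods_variable_dict)
  let indexed := peps.map (fun pep_ => (pep_.1, pvIndexPositions pep_.1 pep_.2))
  indexed.flatMap (fun pq =>
    mods.flatMap (fun q =>
      (PySem.Dict.getD pq.2 q.1 []).map (fun i =>
        ((PySem.List.enumerate pq.1 0).map (fun p => if p.1 == i then q.2 else p.2), i))))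

-- ===== PRECONDITION & SPEC =====
def Spec_add_variable_mod (peps : List (List String × Int)) (mods_variable_dict : List (String × String)) (out : List (List String × Int)) : Prop := out = add_variable_mod_alt peps mods_variable_dict
instance (peps : List (List String × Int)) (mods_variable_dict : List (String × String)) (out : List (List String × Int)) : Decidable (Spec_add_variable_mod peps mods_variable_dict out) := by unfold Spec_add_variable_mod; infer_instance

-- ===== CLAIM (what is proved, stated in full; the proofs are below) =====
def Claim_equal_add_variable_mod : Prop := ∀ (peps : List (List String × Int)) (mods_variable_dict : List (String × String)), Dom_add_variable_mod peps mods_variable_dict → Spec_add_variable_mod peps mods_variable_dict (add_variable_mod peps mods_variable_dict)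

-- ===== LEMMAS AND PROOFS =====

-- A's per-(peptide, mod) index loop appends exactly the filtered-range map.
lemma stepA_eq (pep : List String) (min_idx : Int) (md : PySem.Dict String String) (mod : String) (acc : List (List String × Int)) :
    (PySem.List.pyRange 0 (PySem.List.len pep) 1).foldl (fun acc2 i =>
        if min_idx ≤ i then
          if PySem.List.pyGetD pep i "" == mod then
            acc2 ++ [(PySem.List.slice pep none (some i) ++ [PySem.Dict.getD md (PySem.List.pyGetD pep i "") ""] ++ PySem.List.slice pep (some (i+1)) none, i)]
          else acc2
        else acc2) acc
    = acc ++ ((PySem.List.pyRange 0 (PySem.List.len pep) 1).filter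
        (fun i => decide (min_idx ≤ i) && (PySem.List.pyGetD pep i "" == mod))).map
        (fun i => (PySem.List.slice pep none (some i) ++ [PySem.Dict.getD md (PySem.List.pyGetD pep i "") ""] ++ PySem.List.slice pep (some (i+1)) none, i)) := by
  have h : ∀ (acc2 : List (List String × Int)) (i : Int),
      (if min_idx ≤ i then
        if PySem.List.pyGetD pep i "" == mod then
          acc2 ++ [(PySem.List.slice pep none (some i) ++ [PySem.Dict.getD md (PySem.List.pyGetD pep i "") ""] ++ PySem.List.slice pep (some (i+1)) none, i)]
        else acc2
      else acc2)
      = (if (decide (min_idx ≤ i) && (PySem.List.pyGetD pep i "" == mod)) then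
          acc2 ++ [(PySem.List.slice pep none (some i) ++ [PySem.Dict.getD md (PySem.List.pyGetD pep i "") ""] ++ PySem.List.slice pep (some (i+1)) none, i)]
        else acc2) := by
    intro acc2 i
    by_cases h1 : min_idx ≤ i <;> by_cases h2 : (PySem.List.pyGetD pep i "" == mod) = true <;>
      simp [h1, h2]
  simp only [h]
  exact PySem.List.foldl_append_if _ _ _ _

-- B's position index at key mod is exactly A's filtered range of positions.
lemma positions_getD (pep : List String) (min_idx : Int) (mod : String) :
    PySem.Dict.getD (pvIndexPositions pep min_idx) mod []
    = (PySem.List.pyRange 0 (PySem.List.len pep) 1).filter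
        (fun i => decide (min_idx ≤ i) && (PySem.List.pyGetD pep i "" == mod)) := by
  unfold pvIndexPositions
  rw [PySem.List.foldl_ite_eq_foldl_filter]
  rw [← List.foldl_map (f := fun p : Int × String => (p.2, p.1))
        (g := fun d (q : String × Int) => PySem.Dict.modify d q.1 [] (· ++ [q.2]))]
  rw [PySem.Dict.getD_foldl_modify_append]
  rw [PySem.Dict.getD_empty]
  rw [PySem.List.enumerate_eq_map_pyRange (d := "")]
  simp only [List.filter_map, List.map_map, List.filter_filter, Function.comp]
  simp only [List.nil_append]
  have hid : List.map ((fun p : String × Int => p.2) ∘ (fun p : Int × String => (p.2, p.1)) ∘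
      (fun j : Int => (j, PySem.List.pyGetD pep j ""))) = List.map (id : Int → Int) := by
    apply congrArg; funext j; rfl
  rw [hid, List.map_id]
  apply List.filter_congr
  intro i _
  exact Bool.and_comm _ _

-- within enumerate xs s every index is ≥ s, so a target below s never matches
lemma map_enum_no_match (r : String) : ∀ (xs : List String) (s t : Int), t < s →
    (PySem.List.enumerate xs s).map (fun p => if p.1 == t then r else p.2) = xs := by
  intro xs
  induction xs with
  | nil => intro s t _; simp [PySem.List.enumerate_nil]
  | cons x xs ih =>
    intro s t ht
    rw [PySem.List.enumerate_cons]
    simp only [List.map_cons]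
    have hne : (s == t) = false := beq_eq_false_iff_ne.mpr (by omega)
    simp only [hne, Bool.false_eq_true, if_false]
    rw [ih (s+1) t (by omega)]

-- replacing the element whose enumerate index equals s+n rebuilds take/replace/drop
lemma map_enum_replace (r : String) : ∀ (pep : List String) (n : Nat) (s t : Int), t = s + n → n < pep.length →
    (PySem.List.enumerate pep s).map (fun p => if p.1 == t then r else p.2)
    = pep.take n ++ [r] ++ pep.drop (n+1) := by
  intro pep
  induction pep with
  | nil => intro n s t _ h; simp at h
  | cons x xs ih =>
    intro n s t ht hn
    rw [PySem.List.enumerate_cons]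
    simp only [List.map_cons]
    cases n with
    | zero =>
      have hst : (s == t) = true := beq_iff_eq.mpr (by omega)
      simp only [hst, if_true]
      rw [map_enum_no_match r xs (s+1) t (by omega)]
      simp
    | succ m =>
      have hne : (s == t) = false := beq_eq_false_iff_ne.mpr (by omega)
      simp only [hne, Bool.false_eq_true, if_false]
      rw [ih m (s+1) t (by omega) (by simpa using hn)]
      simp

-- A's slice-splice form of a modified peptide equals B's elementwise rebuild
lemma slice_eq_map_enum (pep : List String) (i : Int) (r : String) (h0 : 0 ≤ i) (h1 : i < (pep.length : Int)) :
    PySem.List.slice pep none (some i) ++ [r] ++ PySem.List.slice pep (some (i+1)) none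
    = (PySem.List.enumerate pep 0).map (fun p => if p.1 == i then r else p.2) := by
  rw [PySem.List.slice_to pep h0, PySem.List.slice_from pep (by omega : (0:Int) ≤ i + 1)]
  rw [map_enum_replace r pep i.toNat 0 i (by omega) (by omega)]
  have : (i+1).toNat = i.toNat + 1 := by omega
  rw [this]

-- ===== VERDICT (by name: the statement is the Claim_ definition above) =====
theorem add_variable_mod_spec : Claim_equal_add_variable_mod := by
  intro peps mods _
  unfold Spec_add_variable_mod add_variable_mod add_variable_mod_alt
  simp only [stepA_eq, PySem.List.foldl_append_eq_flatMap, List.nil_append]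
  rw [PySem.Dict.items_eq_map_keys (PySem.Dict.ofList mods) (PySem.Dict.nodup_keys_ofList mods) ""]
  simp only [List.flatMap_map]
  refine congrArg (fun f => peps.flatMap f) ?_
  funext pep_
  refine congrArg (fun f => (PySem.Dict.ofList mods).keys.flatMap f) ?_
  funext mod
  rw [positions_getD pep_.1 pep_.2 mod]
  refine List.map_congr_left ?_
  intro i hi
  have hm := List.of_mem_filter hi
  have hr := List.mem_filter.mp hi |>.1
  rw [PySem.List.mem_pyRange_one] at hr
  simp only [Bool.and_eq_true, decide_eq_true_eq, beq_iff_eq] at hm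
  rw [hm.2]
  refine Prod.ext ?_ rfl
  exact slice_eq_map_enum pep_.1 i (PySem.Dict.getD (PySem.Dict.ofList mods) mod "") hr.1 (by simpa using hr.2)
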